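-- pv_equiv track=rewrite | github.com/Rahonam/algorithm-syllabus | array/locks_keys.py | match_keys
-- ===== SOURCE A (Python) =====
-- def match_keys(keys: list, locks: list):
--     """
--     Find all matches between keys and locks.
--
--     using: iteration, dictionary
--
--     Args:
--         keys: array of strings
--         locks: array of strings
--
--     Returns:
--         dictionary: mapping of keys to locks
--     """
--     key_map = {}
--
--     for i in keys:
--         key_map[i] = ""
--
--     for i in locks:
--         if i in key_map:
--             key_map[i] = i
--
--     return key_map
-- ===== SOURCE B (Python) =====
-- def match_keys(keys: list, locks: list):
--     lock_set = set(locks)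
--     return {k: (k if k in lock_set else "") for k in keys}
-- ===== Notes on version B (the rewrite author's own statement) =====
-- stated objective: simpler
-- what changed: Instead of initialising a dict over keys and then scanning locks to update matches, B builds a set of locks once and produces the dict in a single comprehension over keys, testing set membership per key.
import Mathlib
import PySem

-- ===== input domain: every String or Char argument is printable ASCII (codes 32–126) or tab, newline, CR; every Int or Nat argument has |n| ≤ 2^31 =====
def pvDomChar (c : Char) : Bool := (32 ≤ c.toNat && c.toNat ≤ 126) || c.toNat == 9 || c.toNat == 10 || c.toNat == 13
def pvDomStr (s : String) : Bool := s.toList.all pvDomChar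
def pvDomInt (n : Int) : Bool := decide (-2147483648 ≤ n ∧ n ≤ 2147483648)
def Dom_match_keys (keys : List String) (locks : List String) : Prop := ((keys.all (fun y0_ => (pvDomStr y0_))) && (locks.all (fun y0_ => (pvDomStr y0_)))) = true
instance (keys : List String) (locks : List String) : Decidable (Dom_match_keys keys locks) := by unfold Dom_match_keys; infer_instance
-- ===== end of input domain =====

-- B replaces A's init-then-update two-pass dict build with a single comprehension over keys
-- against a precomputed set of locks (objective: simpler). Return-value equivalence only.

-- ===== PORT A =====
def match_keys (keys : List String) (locks : List String) : List (String × String) :=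
  let key_map : PySem.Dict String String :=
    keys.foldl (fun d i => d.insert i "") PySem.Dict.empty
  let key_map :=
    locks.foldl (fun d i => if d.contains i then d.insert i i else d) key_map
  key_map.items

-- ===== PORT B =====
def match_keys_alt (keys : List String) (locks : List String) : List (String × String) :=
  let lock_set : PySem.Set String := PySem.Set.ofList locks
  (keys.foldl (fun d k => d.insert k (if lock_set.contains k then k else "")) PySem.Dict.empty).items

-- ===== PRECONDITION & SPEC =====
def Spec_match_keys (keys : List String) (locks : List String) (out : List (String × String)) : Prop := out = match_keys_alt keys locks
instance (keys : List String) (locks : List String) (out : List (String × String)) : Decidable (Spec_match_keys keys locks out) := by unfold Spec_match_keys; infer_instance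

-- ===== CLAIM (what is proved, stated in full; the proofs are below) =====
def Claim_equal_match_keys : Prop := ∀ (keys : List String) (locks : List String), Dom_match_keys keys locks → Spec_match_keys keys locks (match_keys keys locks)

-- ===== LEMMAS AND PROOFS =====

-- A fold inserting each key with a value depending only on the key, started from a dict whose
-- items are s.map (k, f k) with s nodup, yields items (Set.update s keys).map (k, f k).
theorem pv_items_foldl_insert_fn (f : String → String) (keys : List String) :
    ∀ (s : List String), s.Nodup →
    ∀ (d : PySem.Dict String String), d.items = s.map (fun k => (k, f k)) →
    (keys.foldl (fun d k => d.insert k (f k)) d).items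
      = (PySem.Set.update s keys).map (fun k => (k, f k)) := by
  induction keys with
  | nil => intro s _ d hd; simpa [PySem.Set.update] using hd
  | cons k ks ih =>
    intro s hs d hd
    have hkeys : d.keys = s := by
      simp [PySem.Dict.keys, hd, List.map_map, Function.comp_def]
    have hcont : d.contains k = decide (k ∈ s) := by
      rw [PySem.Dict.contains_eq_decide_mem_keys, hkeys]
    by_cases hk : k ∈ s
    · have hc : d.contains k = true := by simp [hcont, hk]
      have hitems : (d.insert k (f k)).items = s.map (fun k => (k, f k)) := by
        rw [PySem.Dict.items_insert_of_contains _ _ hc, hd, List.map_map]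
        refine List.map_congr_left ?_
        intro a _
        by_cases hak : a = k
        · simp [Function.comp, hak]
        · simp [Function.comp, hak]
      have hadd : PySem.Set.add s k = s := by
        simp [PySem.Set.add, PySem.Set.contains, hk]
      have := ih s hs (d.insert k (f k)) hitems
      simpa [List.foldl_cons, PySem.Set.update, hadd] using this
    · have hc : d.contains k = false := by simp [hcont, hk]
      have hitems : (d.insert k (f k)).items = (s ++ [k]).map (fun k => (k, f k)) := by
        rw [PySem.Dict.items_insert_of_not_contains _ _ hc, hd]; simp
      have hnodup : (s ++ [k]).Nodup := by
        refine List.Nodup.append hs (List.nodup_singleton k) ?_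
        simpa [List.disjoint_singleton] using hk
      have hadd : PySem.Set.add s k = s ++ [k] := by
        simp [PySem.Set.add, PySem.Set.contains, hk]
      have := ih (s ++ [k]) hnodup (d.insert k (f k)) hitems
      simpa [List.foldl_cons, PySem.Set.update, hadd] using this

-- A's second loop: updating each lock present in the dict rewrites each item's value to its key
-- exactly when the key occurs in locks.
theorem pv_items_foldl_locks (locks : List String) :
    ∀ (d : PySem.Dict String String),
    (locks.foldl (fun d i => if d.contains i then d.insert i i else d) d).items
      = d.items.map (fun p => if p.1 ∈ locks then (p.1, p.1) else p) := by
  induction locks with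
  | nil => intro d; simp
  | cons i ls ih =>
    intro d
    by_cases hc : d.contains i = true
    · rw [List.foldl_cons]
      simp only [hc, if_true]
      rw [ih (d.insert i i), PySem.Dict.items_insert_of_contains _ _ hc, List.map_map]
      refine List.map_congr_left ?_
      intro p _
      by_cases hp : p.1 = i
      · by_cases hr : p.1 ∈ ls <;> simp [Function.comp, hp, List.mem_cons]
      · have : (p.1 == i) = false := by simp [hp]
        by_cases hr : p.1 ∈ ls <;> simp [Function.comp, this, hp, hr, List.mem_cons]
    · have hc' : d.contains i = false := by simpa using hc
      rw [List.foldl_cons]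
      simp only [hc', if_false, Bool.false_eq_true]
      rw [ih d]
      refine List.map_congr_left ?_
      intro p hp
      have hne : p.1 ≠ i := by
        intro h
        have : p.1 ∈ d.keys := PySem.Dict.mem_keys_of_mem_items _ hp
        rw [← PySem.Dict.contains_iff_mem_keys, h] at this
        simp [hc'] at this
      by_cases hr : p.1 ∈ ls <;> simp [hne, hr, List.mem_cons]

-- ===== VERDICT (by name: the statement is the Claim_ definition above) =====
theorem match_keys_spec : Claim_equal_match_keys := by
  intro keys locks _
  unfold Spec_match_keys match_keys match_keys_alt
  have hA1 := pv_items_foldl_insert_fn (fun _ => "") keys [] List.nodup_nil PySem.Dict.empty rfl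
  have hB := pv_items_foldl_insert_fn
      (fun k => if (PySem.Set.ofList locks).contains k then k else "") keys [] List.nodup_nil
      PySem.Dict.empty rfl
  have hupd : PySem.Set.update ([] : List String) keys = PySem.Set.ofList keys := rfl
  rw [hupd] at hA1 hB
  -- rewrite A's first fold, then apply the locks-fold lemma on its items
  have hA2 := pv_items_foldl_locks locks
      (keys.foldl (fun d i => d.insert i "") PySem.Dict.empty)
  rw [hA1, List.map_map] at hA2
  rw [hA2, hB]
  refine List.map_congr_left ?_
  intro k _
  have hmem : (PySem.Set.ofList locks).contains k = decide (k ∈ locks) := by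
    simp [PySem.Set.contains, PySem.Set.mem_ofList]
  by_cases hk : k ∈ locks <;> simp [Function.comp, hk]
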